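-- pv_equiv track=rewrite | github.com/sentry5588/leetcode | q_030_substring_w_concatenate_all_words.py | checkConcat
-- ===== SOURCE A (Python) =====
-- def checkConcat(m_origin, m):
--     """
--     :type m_origin: map[str, int]
--     :type m: map[str, int]
--     :rtype: bool
--     """
--     match = True
--     for w in m_origin:
--         if w in m:
--             if m[w] != m_origin[w]:
--                 match = False
--         else:
--             match = False
--     return match
-- ===== SOURCE B (Python) =====
-- def checkConcat(m_origin, m):
--     matched = 0
--     for k, v in m.items():
--         if k in m_origin and m_origin[k] == v:
--             matched += 1
--     return matched == len(m_origin)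
-- ===== Notes on version B (the rewrite author's own statement) =====
-- stated objective: alternative
-- what changed: Inverted the traversal: instead of looping over m_origin's keys and clearing a boolean flag on any mismatch, B makes one pass over m's items counting how many pairs are confirmed by m_origin and compares that count with len(m_origin); correctness rests on dict keys being unique, so the count reaches len(m_origin) exactly when every pair of m_origin occurs in m.
import Mathlib
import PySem

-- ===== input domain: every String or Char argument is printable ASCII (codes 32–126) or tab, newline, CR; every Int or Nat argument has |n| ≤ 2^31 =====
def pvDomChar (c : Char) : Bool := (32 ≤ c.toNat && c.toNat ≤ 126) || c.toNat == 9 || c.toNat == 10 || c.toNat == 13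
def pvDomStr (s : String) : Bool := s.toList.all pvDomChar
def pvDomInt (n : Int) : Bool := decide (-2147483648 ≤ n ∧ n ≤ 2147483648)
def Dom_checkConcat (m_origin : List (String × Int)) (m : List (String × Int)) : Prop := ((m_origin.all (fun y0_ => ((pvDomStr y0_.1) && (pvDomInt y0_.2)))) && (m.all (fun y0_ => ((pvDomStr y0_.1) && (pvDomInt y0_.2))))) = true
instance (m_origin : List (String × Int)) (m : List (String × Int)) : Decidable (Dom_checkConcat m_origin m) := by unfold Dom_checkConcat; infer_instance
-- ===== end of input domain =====

-- B inverts the traversal: one pass over m's items counting pairs confirmed by m_origin,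
-- compared with len(m_origin) (alternative decomposition, same cost).

-- ===== PORT A =====
-- A: iterate the keys of m_origin, clearing a flag on any missing key or mismatched value.
def checkConcat (m_origin : List (String × Int)) (m : List (String × Int)) : Bool :=
  (PySem.Dict.ofList m_origin).keys.foldl (fun mtch w =>
    if (PySem.Dict.ofList m).contains w then
      if (PySem.Dict.ofList m).getD w 0 ≠ (PySem.Dict.ofList m_origin).getD w 0 then false else mtch
    else false) true

-- ===== PORT B =====
-- B: count over m.items() the pairs (k, v) with k in m_origin and m_origin[k] == v,
-- then return matched == len(m_origin).
def checkConcat_alt (m_origin : List (String × Int)) (m : List (String × Int)) : Bool :=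
  ((PySem.Dict.ofList m).items.foldl (fun matched p =>
      if (PySem.Dict.ofList m_origin).contains p.1 &&
         ((PySem.Dict.ofList m_origin).getD p.1 0 == p.2) then matched + 1 else matched)
    (0 : Int))
  == ((PySem.Dict.ofList m_origin).keys.length : Int)

-- ===== PRECONDITION & SPEC =====
def Spec_checkConcat (m_origin : List (String × Int)) (m : List (String × Int)) (out : Bool) : Prop := out = checkConcat_alt m_origin m
instance (m_origin : List (String × Int)) (m : List (String × Int)) (out : Bool) : Decidable (Spec_checkConcat m_origin m out) := by unfold Spec_checkConcat; infer_instance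

-- ===== CLAIM (what is proved, stated in full; the proofs are below) =====
def Claim_equal_checkConcat : Prop := ∀ (m_origin : List (String × Int)) (m : List (String × Int)), Dom_checkConcat m_origin m → Spec_checkConcat m_origin m (checkConcat m_origin m)

-- ===== LEMMAS AND PROOFS =====

-- A's flag loop over a key list is the conjunction of the per-key checks
theorem pv_flag_loop (d dO : PySem.Dict String Int) (l : List String) (acc : Bool) :
    l.foldl (fun mtch w =>
        if d.contains w then
          if d.getD w 0 ≠ dO.getD w 0 then false else mtch
        else false) acc
      = (acc && l.all (fun w => d.contains w && (d.getD w 0 == dO.getD w 0))) := by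
  induction l generalizing acc with
  | nil => simp
  | cons w l ih =>
      rw [List.foldl_cons, ih, List.all_cons]
      have hstep : (if d.contains w then
          if d.getD w 0 ≠ dO.getD w 0 then false else acc
        else false) = (acc && (d.contains w && (d.getD w 0 == dO.getD w 0))) := by
        by_cases hc : d.contains w <;> by_cases hq : d.getD w 0 = dO.getD w 0 <;>
          simp [hc, hq]
      rw [hstep, Bool.and_assoc]

-- B's counting loop is countP
theorem pv_count_loop (q : String × Int → Bool) (l : List (String × Int)) (acc : Int) :
    l.foldl (fun matched p => if q p then matched + 1 else matched) acc
      = acc + (l.countP q : Int) := by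
  induction l generalizing acc with
  | nil => simp
  | cons p l ih =>
      rw [List.foldl_cons]
      by_cases hq : q p
      · rw [if_pos hq, ih, List.countP_cons_of_pos hq]
        push_cast
        ring
      · rw [if_neg hq, ih, List.countP_cons_of_neg hq]

-- counting common keys with equal values is symmetric for nodup key lists
theorem pv_countP_swap (d dO : PySem.Dict String Int) (hnd : d.keys.Nodup) (hndO : dO.keys.Nodup) :
    d.keys.countP (fun k => dO.contains k && (dO.getD k 0 == d.getD k 0))
      = dO.keys.countP (fun k => d.contains k && (d.getD k 0 == dO.getD k 0)) := by
  rw [List.countP_eq_length_filter, List.countP_eq_length_filter]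
  apply List.Perm.length_eq
  rw [List.perm_ext_iff_of_nodup (hnd.filter _) (hndO.filter _)]
  intro a
  simp [List.mem_filter, PySem.Dict.contains_eq_decide_mem_keys]
  constructor <;> rintro ⟨h1, h2, h3⟩ <;> exact ⟨h2, h1, h3.symm⟩

-- ===== VERDICT (by name: the statement is the Claim_ definition above) =====
theorem checkConcat_spec : Claim_equal_checkConcat := by
  intro m_origin m _
  unfold Spec_checkConcat checkConcat checkConcat_alt
  set d := PySem.Dict.ofList m with hd
  set dO := PySem.Dict.ofList m_origin with hdO
  have hnd : d.keys.Nodup := PySem.Dict.nodup_keys_ofList m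
  have hndO : dO.keys.Nodup := PySem.Dict.nodup_keys_ofList m_origin
  rw [pv_flag_loop d dO dO.keys true, Bool.true_and,
      pv_count_loop _ d.items 0, zero_add,
      PySem.Dict.items_eq_map_keys d hnd 0, List.countP_map]
  have hcomp : ((fun p : String × Int => dO.contains p.1 && (dO.getD p.1 0 == p.2)) ∘
        (fun k => (k, d.getD k 0)))
      = (fun k => dO.contains k && (dO.getD k 0 == d.getD k 0)) := rfl
  rw [hcomp, pv_countP_swap d dO hnd hndO, Bool.eq_iff_iff]
  simp only [List.all_eq_true, beq_iff_eq, Nat.cast_inj]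
  exact (List.countP_eq_length).symm
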